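-- pv_equiv track=rewrite | github.com/homile/PythonStudy | 2022/01.14_30주차/20220114(2).py | solution
-- ===== SOURCE A (Python) =====
-- def solution(n):
--     answer = [[0 for col in range(n)] for row in range(n)] # 빈 2차원 배열
--     num = 1
--
--     for i in range(n):
--         for j in range(i, n):
--             answer[i][j] = num
--             num += 1
--
--     return answer
-- ===== SOURCE B (Python) =====
-- def solution(n):
--     # closed form: cell (i, j) in the upper triangle holds
--     # i*n - i*(i-1)//2 + (j - i) + 1; lower triangle stays 0
--     return [[i * n - i * (i - 1) // 2 + (j - i) + 1 if j >= i else 0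
--              for j in range(n)]
--             for i in range(n)]
-- ===== Notes on version B (the rewrite author's own statement) =====
-- stated objective: simpler
-- what changed: Replaces the sequential num counter threaded through two nested fill loops by a per-cell closed-form formula i*n - i*(i-1)//2 + (j-i) + 1, so the matrix is built directly by a nested comprehension with no mutable state.
import Mathlib
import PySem

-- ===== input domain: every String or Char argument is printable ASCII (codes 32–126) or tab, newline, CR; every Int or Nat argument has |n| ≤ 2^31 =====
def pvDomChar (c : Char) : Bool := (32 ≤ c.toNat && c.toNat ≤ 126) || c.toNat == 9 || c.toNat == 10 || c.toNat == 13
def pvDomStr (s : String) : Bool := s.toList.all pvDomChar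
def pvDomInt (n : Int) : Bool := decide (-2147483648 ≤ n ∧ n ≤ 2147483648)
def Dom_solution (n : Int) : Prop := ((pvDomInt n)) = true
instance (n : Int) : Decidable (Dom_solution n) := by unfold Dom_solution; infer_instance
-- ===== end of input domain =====

-- B replaces A's running counter with a closed-form value per cell (simpler, no mutable state).

-- ===== PORT A =====
-- answer[i][j] = num  : i and j always come from range(...), hence nonnegative and
-- in range, so List.set with .toNat is exact Python list assignment here.
def pvSetCell (m : List (List Int)) (i j v : Int) : List (List Int) :=
  m.set i.toNat ((m.getD i.toNat []).set j.toNat v)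

def solution (n : Int) : List (List Int) :=
  let answer := (PySem.List.pyRange 0 n 1).map
    (fun _ => (PySem.List.pyRange 0 n 1).map (fun _ => (0 : Int)))
  let st := (PySem.List.pyRange 0 n 1).foldl
    (fun (st : List (List Int) × Int) i =>
      (PySem.List.pyRange i n 1).foldl
        (fun (st2 : List (List Int) × Int) j =>
          (pvSetCell st2.1 i j st2.2, st2.2 + 1))
        st)
    (answer, 1)
  st.1

-- ===== PORT B =====
def solution_alt (n : Int) : List (List Int) :=
  (PySem.List.pyRange 0 n 1).map (fun i =>
    (PySem.List.pyRange 0 n 1).map (fun j =>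
      if j ≥ i then i * n - PySem.Int.floordiv (i * (i - 1)) 2 + (j - i) + 1 else 0))

-- ===== PRECONDITION & SPEC =====
def Spec_solution (n : Int) (out : List (List Int)) : Prop := out = solution_alt n
instance (n : Int) (out : List (List Int)) : Decidable (Spec_solution n out) := by unfold Spec_solution; infer_instance

-- ===== CLAIM (what is proved, stated in full; the proofs are below) =====
def Claim_equal_solution : Prop := ∀ (n : Int), Dom_solution n → Spec_solution n (solution n)

-- ===== LEMMAS AND PROOFS =====

-- B's row i (for proofs)
def pvBRow (n i : Int) : List Int :=
  (PySem.List.pyRange 0 n 1).map (fun j =>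
    if j ≥ i then i * n - PySem.Int.floordiv (i * (i - 1)) 2 + (j - i) + 1 else 0)

def pvZRow (n : Int) : List Int := (PySem.List.pyRange 0 n 1).map (fun _ => (0 : Int))

def pvStart (n k : Int) : Int := k * n - PySem.Int.floordiv (k * (k - 1)) 2 + 1

theorem pvBRow_eq (n i : Int) :
    pvBRow n i = (PySem.List.pyRange 0 n 1).map
      (fun j => if j ≥ i then pvStart n i + (j - i) else 0) := by
  unfold pvBRow pvStart
  exact List.map_congr_left (fun j _ => by split <;> ring_nf)

theorem pvStart_succ (n k : Int) :
    pvStart n (k + 1) = pvStart n k + (n - k) := by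
  unfold pvStart
  have h1 : PySem.Int.floordiv ((k+1) * (k+1-1)) 2 = ((k+1)*(k+1-1)) / 2 :=
    PySem.Int.floordiv_eq_ediv_of_pos (b := 2) (by norm_num)
  have h2 : PySem.Int.floordiv (k * (k-1)) 2 = (k*(k-1)) / 2 :=
    PySem.Int.floordiv_eq_ediv_of_pos (b := 2) (by norm_num)
  rw [h1, h2]
  have hsimp : ((k:Int)+1)*(k+1-1) = (k+1)*k := by ring
  rw [hsimp]
  have he : 2 * (k * (k-1) / 2) = k * (k-1) := by
    have : (2:Int) ∣ k * (k-1) := (Int.even_mul_pred_self k).two_dvd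
    omega
  have he' : 2 * ((k+1) * k / 2) = (k+1) * k := by
    have : (2:Int) ∣ (k+1) * k := (mul_comm k (k+1)) ▸ (Int.even_mul_succ_self k).two_dvd
    omega
  nlinarith [he, he']

-- the inner j-fold, as a plain function on (row, counter)
def pvFill (r : List Int) (js : List Int) (num : Int) : List Int :=
  match js with
  | [] => r
  | j :: js => pvFill (r.set j.toNat num) js (num + 1)

theorem pvFill_spec (m : List (List Int)) (i : Int) (js : List Int) (num : Int)
    (_hi : 0 ≤ i) (hlen : i.toNat < m.length) :
    (js.foldl (fun (st2 : List (List Int) × Int) j =>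
        (pvSetCell st2.1 i j st2.2, st2.2 + 1)) (m, num))
      = (m.set i.toNat (pvFill (m.getD i.toNat []) js num), num + js.length) := by
  induction js generalizing m num with
  | nil =>
      simp only [List.foldl_nil, pvFill, List.length_nil]
      rw [List.getD_eq_getElem?_getD, List.getElem?_eq_getElem hlen]
      simp [List.set_getElem_self]
  | cons j js ih =>
      simp only [List.foldl_cons]
      have hl2 : i.toNat < (pvSetCell m i j num).length := by
        simpa [pvSetCell] using hlen
      rw [ih _ _ hl2]
      simp only [pvSetCell, pvFill]
      have hget : ((m.set i.toNat ((m.getD i.toNat []).set j.toNat num)).getD i.toNat [])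
          = (m.getD i.toNat []).set j.toNat num := by
        rw [List.getD_eq_getElem?_getD, List.getElem?_set_self (by simpa using hlen)]
        simp [List.getD_eq_getElem?_getD]
      rw [hget, List.set_set]
      refine Prod.ext rfl ?_
      simp only [List.length_cons]
      push_cast; ring

theorem pvFill_pyRange : ∀ (N : Nat) (n i num : Int) (r : List Int), 0 ≤ i → i ≤ n →
    (n - i).toNat = N → r.length = n.toNat →
    pvFill r (PySem.List.pyRange i n 1) num
      = r.take i.toNat ++ (PySem.List.pyRange i n 1).map (fun j => num + (j - i)) := by
  intro N
  induction N with
  | zero =>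
      intro n i num r h0 hn hN hr
      have hni : n ≤ i := by omega
      rw [PySem.List.pyRange_one_eq_nil hni]
      simp only [pvFill, List.map_nil, List.append_nil]
      rw [List.take_of_length_le (by omega)]
  | succ N ih =>
      intro n i num r h0 hn hN hr
      have hin : i < n := by omega
      rw [PySem.List.pyRange_one_cons hin]
      simp only [pvFill, List.map_cons]
      rw [ih n (i+1) (num+1) (r.set i.toNat num) (by omega) (by omega) (by omega)
        (by simpa using hr)]
      have hil : i.toNat < r.length := by omega
      have ht : (r.set i.toNat num).take (i+1).toNat = r.take i.toNat ++ [num] := by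
        have : ((i:Int)+1).toNat = i.toNat + 1 := by omega
        rw [this, List.take_add_one, List.getElem?_set_self (by simpa using hil)]
        congr 1
        exact List.take_set_of_le (le_refl _)
      rw [ht]
      have hmap : (PySem.List.pyRange (i+1) n 1).map (fun j => num + 1 + (j - (i+1)))
          = (PySem.List.pyRange (i+1) n 1).map (fun j => num + (j - i)) := by
        exact List.map_congr_left (fun j _ => by ring)
      rw [hmap]
      simp

-- A's matrix state after the first k outer iterations
def pvMat (n k : Int) : List (List Int) :=
  (PySem.List.pyRange 0 n 1).map (fun i => if i < k then pvBRow n i else pvZRow n)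

theorem pvRow_filled (n k : Int) (h0 : 0 ≤ k) (hkn : k ≤ n) :
    (pvZRow n).take k.toNat
      ++ (PySem.List.pyRange k n 1).map (fun j => pvStart n k + (j - k)) = pvBRow n k := by
  have hsplit := PySem.List.pyRange_one_append 0 k n h0 hkn
  rw [pvBRow_eq]
  unfold pvZRow
  rw [hsplit, List.map_append, List.map_append]
  have hlen : ((PySem.List.pyRange 0 k 1).map (fun _ => (0:Int))).length = k.toNat := by
    simp [PySem.List.length_pyRange_one]
  rw [List.take_left' hlen]
  congr 1
  · exact List.map_congr_left (fun j hj => by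
      have := (PySem.List.mem_pyRange_one.mp hj)
      rw [if_neg (by omega)])
  · exact List.map_congr_left (fun j hj => by
      have := (PySem.List.mem_pyRange_one.mp hj)
      rw [if_pos (by omega)])

theorem pvMat_set (n k : Int) (h0 : 0 ≤ k) :
    (pvMat n k).set k.toNat (pvBRow n k) = pvMat n (k+1) := by
  unfold pvMat
  apply List.ext_getElem
  · simp
  · intro p h1 h2
    rw [List.getElem_set]
    simp only [List.getElem_map, PySem.List.getElem_pyRange_one]
    split_ifs with hA hB hC <;> first | rfl | (congr 1; omega)

theorem pvMat_length (n k : Int) : (pvMat n k).length = n.toNat := by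
  simp [pvMat, PySem.List.length_pyRange_one]

theorem pvMat_get_z (n k : Int) (h0 : 0 ≤ k) (hkn : k < n) :
    (pvMat n k).getD k.toNat [] = pvZRow n := by
  unfold pvMat
  have hk : k.toNat < n.toNat := by omega
  rw [List.getD_eq_getElem?_getD,
    List.getElem?_eq_getElem (by simpa [PySem.List.length_pyRange_one] using hk)]
  rw [List.getElem_map]
  have hpy : (PySem.List.pyRange 0 n 1)[k.toNat]'(by simpa [PySem.List.length_pyRange_one] using hk)
      = ((k.toNat : Nat) : Int) := by
    rw [PySem.List.getElem_pyRange_one]; omega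
  rw [hpy]
  simp

theorem pvOuter : ∀ (N : Nat) (n k : Int), 0 ≤ k → k ≤ n → (n - k).toNat = N →
    ((PySem.List.pyRange k n 1).foldl
      (fun (st : List (List Int) × Int) i =>
        (PySem.List.pyRange i n 1).foldl
          (fun (st2 : List (List Int) × Int) j =>
            (pvSetCell st2.1 i j st2.2, st2.2 + 1))
          st)
      (pvMat n k, pvStart n k))
    = (pvMat n n, pvStart n n) := by
  intro N
  induction N with
  | zero =>
      intro n k h0 hn hN
      have hk : k = n := by omega
      subst hk
      rw [PySem.List.pyRange_one_eq_nil (le_refl _)]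
      rfl
  | succ N ih =>
      intro n k h0 hn hN
      have hkn : k < n := by omega
      rw [PySem.List.pyRange_one_cons hkn, List.foldl_cons]
      have hstep := pvFill_spec (pvMat n k) k (PySem.List.pyRange k n 1) (pvStart n k)
        h0 (by rw [pvMat_length]; omega)
      rw [hstep, pvMat_get_z n k h0 hkn]
      rw [pvFill_pyRange (n - k).toNat n k (pvStart n k) (pvZRow n) h0 (by omega) rfl
        (by simp [pvZRow, PySem.List.length_pyRange_one])]
      rw [pvRow_filled n k h0 (by omega), pvMat_set n k h0]
      have hnum : pvStart n k + ((PySem.List.pyRange k n 1).length : Int) = pvStart n (k+1) := by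
        rw [PySem.List.length_pyRange_one, pvStart_succ]
        omega
      rw [hnum]
      exact ih n (k+1) (by omega) (by omega) (by omega)

theorem solution_spec : Claim_equal_solution := by
  intro n _
  unfold Spec_solution solution solution_alt
  by_cases hn : 0 ≤ n
  · have hmat0 : (PySem.List.pyRange 0 n 1).map
        (fun _ => (PySem.List.pyRange 0 n 1).map (fun _ => (0 : Int))) = pvMat n 0 := by
      unfold pvMat pvZRow
      exact List.map_congr_left (fun i hi => by
        have := PySem.List.mem_pyRange_one.mp hi
        rw [if_neg (by omega)])
    have hs0 : (1 : Int) = pvStart n 0 := by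
      unfold pvStart
      norm_num [PySem.Int.floordiv]
    have h := pvOuter (n - 0).toNat n 0 (le_refl _) hn rfl
    rw [← hs0, ← hmat0] at h
    simp only []
    rw [h]
    unfold pvMat
    exact List.map_congr_left (fun i hi => by
      have := PySem.List.mem_pyRange_one.mp hi
      rw [if_pos (by omega)]; rfl)
  · rw [PySem.List.pyRange_one_eq_nil (by omega)]
    rfl
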